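-- pv_equiv track=rewrite | github.com/dr0n1/RPT | main.py | _escape_for_cmd_echo
-- ===== SOURCE A (Python) =====
-- def _escape_for_cmd_echo(command_text):
--     replacements = {
--         "^": "^^",
--         "&": "^&",
--         "|": "^|",
--         ">": "^>",
--         "<": "^<",
--         '"': '""',
--     }
--     escaped = command_text
--     for char, replacement in replacements.items():
--         escaped = escaped.replace(char, replacement)
--     return escaped
-- ===== SOURCE B (Python) =====
-- def _escape_for_cmd_echo(command_text):
--     escaped = ""
--     for ch in command_text:
--         if ch in "^&|><":
--             escaped += "^" + ch
--         elif ch == '"':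
--             escaped += '""'
--         else:
--             escaped += ch
--     return escaped
-- ===== Notes on version B (the rewrite author's own statement) =====
-- stated objective: simpler
-- what changed: One left-to-right pass with a string accumulator and an if/elif chain (caret-class chars get a caret prefixed, a quote is doubled) replaces six sequential full-string replace() scans over a dict of patterns.
import Mathlib
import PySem

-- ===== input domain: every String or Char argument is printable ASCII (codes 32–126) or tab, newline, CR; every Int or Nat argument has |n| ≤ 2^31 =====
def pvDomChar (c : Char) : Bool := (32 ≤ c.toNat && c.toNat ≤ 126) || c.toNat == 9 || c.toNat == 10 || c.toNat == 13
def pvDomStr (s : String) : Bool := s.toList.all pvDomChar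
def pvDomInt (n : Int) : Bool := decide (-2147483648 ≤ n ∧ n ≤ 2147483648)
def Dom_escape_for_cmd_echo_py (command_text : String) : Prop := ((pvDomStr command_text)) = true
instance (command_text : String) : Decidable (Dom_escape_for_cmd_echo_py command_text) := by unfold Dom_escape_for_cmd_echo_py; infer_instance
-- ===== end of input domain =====

-- B replaces A's six sequential full-string .replace passes over a dict with one
-- left-to-right pass using a string accumulator and an if/elif chain (objective: simpler).

-- ===== PORT A =====
-- the dict literal of A (insertion order kept)
def pvReplacements : PySem.Dict String String :=
  PySem.Dict.mk [("^", "^^"), ("&", "^&"), ("|", "^|"), (">", "^>"), ("<", "^<"), ("\"", "\"\"")]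

def escape_for_cmd_echo_py (command_text : String) : String :=
  -- for char, replacement in replacements.items(): escaped = escaped.replace(char, replacement)
  pvReplacements.items.foldl (fun escaped p => PySem.Str.replace escaped p.1 p.2) command_text

-- ===== PORT B =====
def escape_for_cmd_echo_py_alt (command_text : String) : String :=
  -- escaped = ""; for ch in command_text: if ch in "^&|><": escaped += "^"+ch
  --   elif ch == '"': escaped += '""'  else: escaped += ch
  command_text.toList.foldl
    (fun escaped ch =>
      if ("^&|><".toList).contains ch then escaped ++ String.ofList ['^', ch]
      else if ch = '"' then escaped ++ "\"\""
      else escaped ++ String.ofList [ch]) ""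

-- ===== PRECONDITION & SPEC =====
def Spec_escape_for_cmd_echo_py (command_text : String) (out : String) : Prop := out = escape_for_cmd_echo_py_alt command_text
instance (command_text : String) (out : String) : Decidable (Spec_escape_for_cmd_echo_py command_text out) := by unfold Spec_escape_for_cmd_echo_py; infer_instance

-- ===== CLAIM (what is proved, stated in full; the proofs are below) =====
def Claim_equal_escape_for_cmd_echo_py : Prop := ∀ (command_text : String), Dom_escape_for_cmd_echo_py command_text → Spec_escape_for_cmd_echo_py command_text (escape_for_cmd_echo_py command_text)

-- ===== LEMMAS AND PROOFS =====

-- substitution of one character by a string, as a flatMap step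
def pvSubst (c : Char) (r : List Char) (ch : Char) : List Char := if ch = c then r else [ch]

-- the per-character effect both programs have (list-of-chars view)
def pvTable (ch : Char) : List Char :=
  if ch = '^' then ['^', '^']
  else if ch = '&' then ['^', '&']
  else if ch = '|' then ['^', '|']
  else if ch = '>' then ['^', '>']
  else if ch = '<' then ['^', '<']
  else if ch = '"' then ['"', '"']
  else [ch]

theorem pv_go_single (c : Char) (r : List Char) :
    ∀ (fuel : Nat) (l acc : List Char), l.length ≤ fuel →
      PySem.Chars.replace.go [c] r fuel l acc = acc.reverse ++ l.flatMap (pvSubst c r) := by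
  intro fuel
  induction fuel with
  | zero =>
    intro l acc h
    have : l = [] := List.eq_nil_of_length_eq_zero (Nat.le_zero.mp h)
    subst this
    simp [PySem.Chars.replace.go]
  | succ n ih =>
    intro l acc h
    cases l with
    | nil => simp [PySem.Chars.replace.go]
    | cons x t =>
      by_cases hx : x = c
      · subst hx
        have hpre : List.isPrefixOf [x] (x :: t) = true := by
          simp [List.isPrefixOf]
        rw [PySem.Chars.replace.go]
        simp only [hpre, if_pos]
        have ht : t.length ≤ n := by simpa using Nat.succ_le_succ_iff.mp (by simpa using h)
        rw [show List.drop (List.length [x]) (x :: t) = t by simp]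
        rw [ih t (r.reverse ++ acc) ht]
        simp [pvSubst]
      · have hpre : List.isPrefixOf [c] (x :: t) = false := by
          simp [List.isPrefixOf]
          exact fun hc => (hx hc.symm).elim
        rw [PySem.Chars.replace.go]
        simp only [hpre]
        have ht : t.length ≤ n := by simpa using Nat.succ_le_succ_iff.mp (by simpa using h)
        rw [if_neg (by simp)]
        rw [ih t (x :: acc) ht]
        simp [pvSubst, hx]

theorem pv_replace_single (s : List Char) (c : Char) (r : List Char) :
    PySem.Chars.replace s [c] r = s.flatMap (pvSubst c r) := by
  rw [PySem.Chars.replace]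
  rw [if_neg (by simp)]
  simpa using pv_go_single c r s.length s [] (le_refl _)

theorem pv_A_toList (s : String) :
    (escape_for_cmd_echo_py s).toList = s.toList.flatMap pvTable := by
  show (PySem.Str.replace (PySem.Str.replace (PySem.Str.replace (PySem.Str.replace
        (PySem.Str.replace (PySem.Str.replace s "^" "^^") "&" "^&") "|" "^|")
        ">" "^>") "<" "^<") "\"" "\"\"").toList = s.toList.flatMap pvTable
  simp only [PySem.Str.toList_replace]
  rw [show ("^" : String).toList = ['^'] from rfl, show ("^^" : String).toList = ['^','^'] from rfl,
      show ("&" : String).toList = ['&'] from rfl, show ("^&" : String).toList = ['^','&'] from rfl,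
      show ("|" : String).toList = ['|'] from rfl, show ("^|" : String).toList = ['^','|'] from rfl,
      show (">" : String).toList = ['>'] from rfl, show ("^>" : String).toList = ['^','>'] from rfl,
      show ("<" : String).toList = ['<'] from rfl, show ("^<" : String).toList = ['^','<'] from rfl,
      show ("\"" : String).toList = ['"'] from rfl, show ("\"\"" : String).toList = ['"','"'] from rfl]
  rw [pv_replace_single, pv_replace_single, pv_replace_single, pv_replace_single,
      pv_replace_single, pv_replace_single]
  simp only [List.flatMap_assoc]
  induction s.toList with
  | nil => simp
  | cons x t ih =>
    simp only [List.flatMap_cons]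
    rw [ih]
    congr 1
    by_cases h1 : x = '^' <;> by_cases h2 : x = '&' <;> by_cases h3 : x = '|' <;>
      by_cases h4 : x = '>' <;> by_cases h5 : x = '<' <;> by_cases h6 : x = '"' <;>
      simp_all [pvSubst, pvTable]

-- B's loop body appends exactly pvTable ch (list-of-chars view)
theorem pv_B_step (ch : Char) (acc : String) :
    ((if ("^&|><".toList).contains ch then acc ++ String.ofList ['^', ch]
      else if ch = '"' then acc ++ "\"\""
      else acc ++ String.ofList [ch]) : String).toList = acc.toList ++ pvTable ch := by
  by_cases h1 : ch = '^' <;> by_cases h2 : ch = '&' <;> by_cases h3 : ch = '|' <;>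
    by_cases h4 : ch = '>' <;> by_cases h5 : ch = '<' <;> by_cases h6 : ch = '"' <;>
    simp_all [pvTable, String.toList_ofList]

theorem pv_B_inv (l : List Char) :
    ∀ (acc : String),
      (l.foldl (fun escaped ch =>
        if ("^&|><".toList).contains ch then escaped ++ String.ofList ['^', ch]
        else if ch = '"' then escaped ++ "\"\""
        else escaped ++ String.ofList [ch]) acc).toList = acc.toList ++ l.flatMap pvTable := by
  induction l with
  | nil => intro acc; simp
  | cons x t ih =>
    intro acc
    simp only [List.foldl_cons, List.flatMap_cons]
    rw [ih, pv_B_step]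
    simp

theorem pv_B_toList (s : String) :
    (escape_for_cmd_echo_py_alt s).toList = s.toList.flatMap pvTable := by
  show (s.toList.foldl _ "").toList = _
  rw [pv_B_inv]
  rfl

-- ===== VERDICT (by name: the statement is the Claim_ definition above) =====
theorem escape_for_cmd_echo_py_spec : Claim_equal_escape_for_cmd_echo_py := by
  intro s _
  unfold Spec_escape_for_cmd_echo_py
  exact String.toList_inj.mp ((pv_A_toList s).trans (pv_B_toList s).symm)
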